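-- pv_equiv track=rewrite | github.com/Jesus-ggez/tc-ui | src/generators/stub_gen.py | replace_to_pytypes
-- ===== SOURCE A (Python) =====
-- def replace_to_pytypes(word) -> str:
--     nums: tuple = ('i32', 'i16', 'i8', 'isize', 'i64', 'u32', 'u16', 'u8', 'usize', 'u64')
--     new_word: str = word\
--         .replace('String', 'str')
--
--     for num in nums:
--         new_word = new_word\
--             .replace(num, 'int')
--
--
--     return new_word
-- ===== SOURCE B (Python) =====
-- def replace_to_pytypes(word) -> str:
--     # one left-to-right pass with a token table instead of eleven sequential
--     # .replace passes; tokens never overlap and no replacement re-creates a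
--     # token, so the result is identical.
--     table = (
--         ('String', 'str'),
--         ('i32', 'int'), ('i16', 'int'), ('i8', 'int'), ('isize', 'int'),
--         ('i64', 'int'), ('u32', 'int'), ('u16', 'int'), ('u8', 'int'),
--         ('usize', 'int'), ('u64', 'int'),
--     )
--     out = []
--     i = 0
--     n = len(word)
--     while i < n:
--         for tok, rep in table:
--             if word.startswith(tok, i):
--                 out.append(rep)
--                 i += len(tok)
--                 break
--         else:
--             out.append(word[i])
--             i += 1
--     return ''.join(out)
-- ===== Notes on version B (the rewrite author's own statement) =====
-- stated objective: alternative
-- what changed: Eleven sequential str.replace passes are replaced by a single left-to-right scan with a token->replacement table (match a token at the current position, emit its replacement, else copy the char); this is exact because the tokens never overlap and no replacement contains a token.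
import Mathlib
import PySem

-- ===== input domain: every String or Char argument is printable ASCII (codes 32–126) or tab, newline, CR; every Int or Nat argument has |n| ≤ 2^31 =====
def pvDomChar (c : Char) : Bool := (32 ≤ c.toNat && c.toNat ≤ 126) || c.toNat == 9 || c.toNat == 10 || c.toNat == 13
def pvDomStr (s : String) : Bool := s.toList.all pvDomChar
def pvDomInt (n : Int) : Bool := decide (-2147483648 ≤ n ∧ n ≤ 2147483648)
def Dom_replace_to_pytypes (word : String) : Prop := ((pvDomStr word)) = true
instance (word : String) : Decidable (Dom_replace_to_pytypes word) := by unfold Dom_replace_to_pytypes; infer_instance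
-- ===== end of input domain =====

-- B replaces A's eleven sequential .replace passes by a single left-to-right scan over the
-- string with a token→replacement table; proved to return the same string on every input.

-- ===== PORT A =====
def replace_to_pytypes (word : String) : String :=
  let nums : List String := ["i32", "i16", "i8", "isize", "i64", "u32", "u16", "u8", "usize", "u64"]
  let new_word : String := PySem.Str.replace word "String" "str"
  nums.foldl (fun nw num => PySem.Str.replace nw num "int") new_word

-- ===== PORT B =====
def pvTable : List (List Char × List Char) :=
  [("String".toList, "str".toList),
   ("i32".toList, "int".toList), ("i16".toList, "int".toList), ("i8".toList, "int".toList),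
   ("isize".toList, "int".toList), ("i64".toList, "int".toList), ("u32".toList, "int".toList),
   ("u16".toList, "int".toList), ("u8".toList, "int".toList), ("usize".toList, "int".toList),
   ("u64".toList, "int".toList)]

theorem pvTable_ne : ∀ p ∈ pvTable, 1 ≤ p.1.length := by decide

def pvScan (tbl : List (List Char × List Char)) (h : ∀ p ∈ tbl, 1 ≤ p.1.length) :
    List Char → List Char
  | [] => []
  | c :: l =>
    match hf : tbl.find? (fun p => p.1.isPrefixOf (c :: l)) with
    | some p => p.2 ++ pvScan tbl h ((c :: l).drop p.1.length)
    | none => c :: pvScan tbl h l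
termination_by l => l.length
decreasing_by
  · have hm := List.mem_of_find?_eq_some hf
    have := h _ hm
    simp
    omega
  · simp

def replace_to_pytypes_alt (word : String) : String :=
  String.ofList (pvScan pvTable pvTable_ne word.toList)

-- ===== PRECONDITION & SPEC =====
def Spec_replace_to_pytypes (word : String) (out : String) : Prop := out = replace_to_pytypes_alt word
instance (word : String) (out : String) : Decidable (Spec_replace_to_pytypes word out) := by unfold Spec_replace_to_pytypes; infer_instance

-- ===== CLAIM (what is proved, stated in full; the proofs are below) =====
def Claim_equal_replace_to_pytypes : Prop := ∀ (word : String), Dom_replace_to_pytypes word → Spec_replace_to_pytypes word (replace_to_pytypes word)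

-- ===== LEMMAS AND PROOFS =====
theorem pvScan_nil (tbl h) : pvScan tbl h [] = [] := by rw [pvScan]

theorem pvScan_cons_some (tbl h c l p) (hf : tbl.find? (fun p => p.1.isPrefixOf (c :: l)) = some p) :
    pvScan tbl h (c :: l) = p.2 ++ pvScan tbl h ((c :: l).drop p.1.length) := by
  rw [pvScan]
  split
  · rename_i p' hf'
    rw [hf] at hf'
    cases hf'
    rfl
  · rename_i hf'
    rw [hf] at hf'
    cases hf'

theorem pvScan_cons_none (tbl h c l) (hf : tbl.find? (fun p => p.1.isPrefixOf (c :: l)) = none) :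
    pvScan tbl h (c :: l) = c :: pvScan tbl h l := by
  rw [pvScan]
  split
  · rename_i p' hf'
    rw [hf] at hf'
    cases hf'
  · rfl

def pvRepl (t n : List Char) (ht : t ≠ []) : List Char → List Char
  | [] => []
  | c :: l => if t.isPrefixOf (c :: l) then n ++ pvRepl t n ht ((c :: l).drop t.length)
              else c :: pvRepl t n ht l
termination_by l => l.length
decreasing_by
  · have : 1 ≤ t.length := List.length_pos_of_ne_nil ht
    simp
    omega
  · simp

theorem go_eq (t n : List Char) (ht : t ≠ []) :
    ∀ (fuel : Nat) (l acc : List Char), l.length ≤ fuel →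
      PySem.Chars.replace.go t n fuel l acc = acc.reverse ++ pvRepl t n ht l := by
  intro fuel
  induction fuel with
  | zero =>
    intro l acc hl
    have : l = [] := by cases l <;> simp_all
    subst this
    simp [PySem.Chars.replace.go, pvRepl]
  | succ fuel ih =>
    intro l acc hl
    cases l with
    | nil => simp [PySem.Chars.replace.go, pvRepl]
    | cons c l' =>
      rw [PySem.Chars.replace.go]
      rw [pvRepl]
      simp only [List.length_cons] at hl
      have h1 : 1 ≤ t.length := List.length_pos_of_ne_nil ht
      by_cases hp : t.isPrefixOf (c :: l') = true
      · simp only [hp, if_true]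
        rw [ih ((c :: l').drop t.length) (n.reverse ++ acc) (by simp; omega)]
        simp
      · simp only [hp]
        rw [ih l' (c :: acc) (by omega)]
        simp

theorem replace_eq_pvRepl (l t n : List Char) (ht : t ≠ []) :
    PySem.Chars.replace l t n = pvRepl t n ht l := by
  unfold PySem.Chars.replace
  rw [if_neg (by simp [ht])]
  simpa using go_eq t n ht l.length l [] le_rfl

def pvCompat (u v : List Char) : Bool := u.isPrefixOf v || v.isPrefixOf u

theorem pvCompat_symm {u v : List Char} (h : pvCompat u v) : pvCompat v u := by
  simp only [pvCompat, Bool.or_eq_true, List.isPrefixOf_iff_prefix] at h ⊢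
  exact h.symm

-- two prefixes of the same list are compatible
theorem pvCompat_of_prefix {u v w : List Char} (hu : u <+: w) (hv : v <+: w) : pvCompat u v := by
  simp only [pvCompat, Bool.or_eq_true, List.isPrefixOf_iff_prefix]
  exact List.prefix_or_prefix_of_prefix hu hv

-- a token matching at the start of a ++ m is compatible with a
theorem pvCompat_of_prefix_append {q a m : List Char} (hq : q <+: a ++ m) : pvCompat a q :=
  pvCompat_of_prefix (List.prefix_append a m) hq

-- S1: scanning skips over a block no token can start in
theorem pvScan_append (ts : List (List Char × List Char)) (h : ∀ p ∈ ts, 1 ≤ p.1.length) :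
    ∀ (u m : List Char), (∀ j < u.length, ∀ p ∈ ts, ¬ pvCompat (u.drop j) p.1) →
      pvScan ts h (u ++ m) = u ++ pvScan ts h m := by
  intro u
  induction u with
  | nil => intro m _; simp
  | cons a u' ih =>
    intro m hu
    have hnone : ts.find? (fun p => p.1.isPrefixOf (a :: u' ++ m)) = none := by
      rw [List.find?_eq_none]
      intro p hp
      simp only [List.isPrefixOf_iff_prefix]
      intro hpre
      exact hu 0 (by simp) p hp (pvCompat_of_prefix_append (by simpa using hpre))
    calc pvScan ts h (a :: (u' ++ m)) = a :: pvScan ts h (u' ++ m) :=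
          pvScan_cons_none ts h a (u' ++ m) hnone
      _ = a :: (u' ++ pvScan ts h m) := by
          rw [ih m (fun j hj p hp => hu (j+1) (by simpa using Nat.succ_lt_succ hj) p hp)]
      _ = (a :: u') ++ pvScan ts h m := rfl

-- S2: pvRepl leaves a match-free prefix unchanged
theorem pvRepl_skip (t n : List Char) (ht : t ≠ []) :
    ∀ (k : Nat) (l : List Char), k ≤ l.length → (∀ i < k, ¬ t <+: l.drop i) →
      pvRepl t n ht l = l.take k ++ pvRepl t n ht (l.drop k) := by
  intro k
  induction k with
  | zero => intro l _ _; simp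
  | succ k ih =>
    intro l hk hno
    cases l with
    | nil => simp at hk
    | cons c l' =>
      rw [pvRepl, if_neg (by simpa [List.isPrefixOf_iff_prefix] using hno 0 (Nat.succ_pos k))]
      rw [ih l' (by simpa using hk) (fun i hi => by simpa using hno (i+1) (Nat.succ_lt_succ hi))]
      simp

-- S3: first-match decomposition of pvRepl
theorem pvRepl_cases (t n : List Char) (ht : t ≠ []) (l : List Char) :
    (pvRepl t n ht l = l ∧ ∀ i, ¬ t <+: l.drop i)
    ∨ ∃ q, q < l.length ∧ (∀ i < q, ¬ t <+: l.drop i) ∧ t <+: l.drop q ∧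
        pvRepl t n ht l = l.take q ++ n ++ pvRepl t n ht (l.drop (q + t.length)) := by
  induction l with
  | nil =>
    left
    constructor
    · rw [pvRepl]
    · intro i
      simp [List.drop_nil, List.prefix_nil, ht]
  | cons c l' ih =>
    by_cases hp : t <+: (c :: l')
    · right
      refine ⟨0, by simp, by simp, by simpa using hp, ?_⟩
      rw [pvRepl, if_pos (by simpa [List.isPrefixOf_iff_prefix] using hp)]
      simp
    · have hstep : pvRepl t n ht (c :: l') = c :: pvRepl t n ht l' := by
        rw [pvRepl, if_neg (by simpa [List.isPrefixOf_iff_prefix] using hp)]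
      rcases ih with ⟨heq, hno⟩ | ⟨q, hq, hno, hmatch, heq⟩
      · left
        refine ⟨by rw [hstep, heq], ?_⟩
        intro i
        cases i with
        | zero => simpa using hp
        | succ i => simpa using hno i
      · right
        refine ⟨q + 1, by simpa using Nat.succ_lt_succ hq, ?_, by simpa using hmatch, ?_⟩
        · intro i hi
          cases i with
          | zero => simpa using hp
          | succ i => simpa using hno i (by omega)
        · rw [hstep, heq]
          simp [Nat.succ_add]

def pvReplS (t n : List Char) (l : List Char) : List Char :=
  if ht : t = [] then l else pvRepl t n ht l

theorem pvReplS_eq (t n : List Char) (ht : t ≠ []) (l : List Char) :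
    pvReplS t n l = pvRepl t n ht l := by
  simp [pvReplS, ht]

theorem chars_eq (l t n : List Char) (ht : t ≠ []) :
    PySem.Chars.replace l t n = pvReplS t n l := by
  rw [pvReplS_eq t n ht, replace_eq_pvRepl l t n ht]

theorem pvFind?_congr {α : Type} (P Q : α → Bool) :
    ∀ l : List α, (∀ a ∈ l, P a = Q a) → l.find? P = l.find? Q := by
  intro l
  induction l with
  | nil => intro _; rfl
  | cons a l ih =>
    intro h
    simp only [List.find?]
    rw [h a (by simp)]
    cases Q a
    · exact ih (fun b hb => h b (by simp [hb]))
    · rfl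

-- the pointwise stability of a token match under one replacement pass
theorem pvPrefix_iff (t n : List Char) (ht : t ≠ []) (q : List Char) (l : List Char)
    (hhead : ¬ t <+: l)
    (hqt : ∀ i < q.length, 0 < i → ¬ pvCompat (q.drop i) t)
    (hqn : ∀ i < q.length, 0 < i → ¬ pvCompat (q.drop i) n) :
    (q <+: l ↔ q <+: pvRepl t n ht l) := by
  rcases pvRepl_cases t n ht l with ⟨heq, _⟩ | ⟨p, hplt, hno, hmatch, heq⟩
  · rw [heq]
  · have hp0 : 0 < p := by
      rcases Nat.eq_zero_or_pos p with h0 | h0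
      · subst h0; simp at hmatch; exact absurd hmatch hhead
      · exact h0
    have htakelen : (l.take p).length = p := by simp; omega
    constructor
    · intro hql
      have hlen : q.length ≤ p := by
        by_contra hgt
        simp only [not_le] at hgt
        exact hqt p hgt hp0 (pvCompat_of_prefix (hql.drop p) hmatch)
      have hqtake : q <+: l.take p := List.prefix_take_iff.mpr ⟨hql, hlen⟩
      rw [heq, List.append_assoc]
      exact hqtake.trans (List.prefix_append _ _)
    · intro hqr
      rw [heq, List.append_assoc] at hqr
      rcases Nat.lt_or_ge p q.length with hgt | hle
      · exfalso
        have hdrop : q.drop p <+: n ++ (pvRepl t n ht (l.drop (p + t.length))) := by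
          have h1 := hqr.drop p
          rwa [List.drop_left' htakelen] at h1
        exact hqn p hgt hp0 (pvCompat_symm (pvCompat_of_prefix_append hdrop))
      · obtain ⟨w, hw⟩ := hqr
        have h3 := congrArg (List.take q.length) hw
        rw [List.take_append_of_le_length (Nat.le_refl _), List.take_length,
            List.take_append_of_le_length (by rw [htakelen]; omega)] at h3
        have hq2 : q <+: l.take p := by rw [h3]; exact List.take_prefix _ _
        exact hq2.trans (List.take_prefix p l)

-- one replacement pass can be peeled off the front of the scan table
theorem pvPeel (t n : List Char) (ht : t ≠ []) (ts : List (List Char × List Char))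
    (hts : ∀ p ∈ ts, 1 ≤ p.1.length) (h' : ∀ p ∈ (t, n) :: ts, 1 ≤ p.1.length)
    (hC2 : ∀ p ∈ ts, ∀ i < p.1.length, 0 < i → ¬ pvCompat (p.1.drop i) t)
    (hC3 : ∀ p ∈ ts, ∀ i < p.1.length, 0 < i → ¬ pvCompat (p.1.drop i) n)
    (hCr : ∀ j < n.length, ∀ p ∈ ts, ¬ pvCompat (n.drop j) p.1) :
    ∀ l, pvScan ((t, n) :: ts) h' l = pvScan ts hts (pvRepl t n ht l) := by
  have ht1 : 1 ≤ t.length := List.length_pos_of_ne_nil ht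
  suffices H : ∀ (N : Nat) (l : List Char), l.length ≤ N →
      pvScan ((t, n) :: ts) h' l = pvScan ts hts (pvRepl t n ht l) by
    intro l; exact H l.length l (Nat.le_refl _)
  intro N
  induction N with
  | zero =>
    intro l hl
    have : l = [] := by cases l <;> simp_all
    subst this
    rw [pvRepl, pvScan_nil, pvScan_nil]
  | succ N ih =>
    intro l hl
    cases l with
    | nil => rw [pvRepl, pvScan_nil, pvScan_nil]
    | cons c l' =>
      simp only [List.length_cons] at hl
      by_cases hp : t <+: (c :: l')
      · -- the head token matches: both sides emit n and continue after it
        have hptrue : t.isPrefixOf (c :: l') = true := by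
          simpa [List.isPrefixOf_iff_prefix] using hp
        have hf : ((t, n) :: ts).find? (fun p => p.1.isPrefixOf (c :: l')) = some (t, n) := by
          simp [List.find?, hptrue]
        rw [pvScan_cons_some _ _ _ _ _ hf]
        rw [pvRepl, if_pos (by simpa [List.isPrefixOf_iff_prefix] using hp)]
        rw [pvScan_append ts hts n _ (fun j hj p hpmem => hCr j hj p hpmem)]
        rw [ih ((c :: l').drop t.length) (by simp; omega)]
      · -- no head match of t: the two scans see pointwise-identical token matches
        have hpfalse : t.isPrefixOf (c :: l') = false := by
          simp only [Bool.eq_false_iff, ne_eq, List.isPrefixOf_iff_prefix]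
          exact hp
        have hstep : pvRepl t n ht (c :: l') = c :: pvRepl t n ht l' := by
          rw [pvRepl, if_neg (by simp [hpfalse])]
        have hiff : ∀ q ∈ ts, (q.1.isPrefixOf (c :: l') : Bool)
            = q.1.isPrefixOf (pvRepl t n ht (c :: l')) := by
          intro q hq
          have := pvPrefix_iff t n ht q.1 (c :: l') hp
            (fun i hi h0 => hC2 q hq i hi h0) (fun i hi h0 => hC3 q hq i hi h0)
          by_cases hone : q.1 <+: (c :: l')
          · rw [show q.1.isPrefixOf (c :: l') = true by
                simpa [List.isPrefixOf_iff_prefix] using hone,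
              show q.1.isPrefixOf (pvRepl t n ht (c :: l')) = true by
                simpa [List.isPrefixOf_iff_prefix] using this.mp hone]
          · rw [show q.1.isPrefixOf (c :: l') = false by
                simp only [Bool.eq_false_iff, ne_eq, List.isPrefixOf_iff_prefix]; exact hone,
              show q.1.isPrefixOf (pvRepl t n ht (c :: l')) = false by
                simp only [Bool.eq_false_iff, ne_eq, List.isPrefixOf_iff_prefix]
                exact fun hc => hone (this.mpr hc)]
        have hfind : ts.find? (fun p => p.1.isPrefixOf (c :: l'))
            = ts.find? (fun p => p.1.isPrefixOf (pvRepl t n ht (c :: l'))) :=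
          pvFind?_congr _ _ ts hiff
        cases hf : ts.find? (fun p => p.1.isPrefixOf (c :: l')) with
        | none =>
          have hfL : ((t, n) :: ts).find? (fun p => p.1.isPrefixOf (c :: l')) = none := by
            simp only [List.find?, hpfalse]
            exact hf
          rw [pvScan_cons_none _ _ _ _ hfL, hstep,
              pvScan_cons_none ts hts _ _ (by rw [← hstep, ← hfind]; exact hf)]
          rw [ih l' (by omega)]
        | some q =>
          have hqmem : q ∈ ts := List.mem_of_find?_eq_some hf
          have hqpref : q.1 <+: (c :: l') := by
            have := List.find?_some hf
            simpa [List.isPrefixOf_iff_prefix] using this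
          have hq1 : 1 ≤ q.1.length := hts q hqmem
          have hqlen : q.1.length ≤ l'.length + 1 := by
            simpa using hqpref.length_le
          have hfL : ((t, n) :: ts).find? (fun p => p.1.isPrefixOf (c :: l')) = some q := by
            simp only [List.find?, hpfalse]
            exact hf
          rw [pvScan_cons_some _ _ _ _ _ hfL]
          -- the replacement pass leaves the matched token's span untouched
          have hnomatch : ∀ i < q.1.length, ¬ t <+: (c :: l').drop i := by
            intro i hi
            cases i with
            | zero => simpa using hp
            | succ i =>
              intro hti
              exact hC2 q hqmem (i + 1) hi (Nat.succ_pos i)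
                (pvCompat_of_prefix (hqpref.drop (i + 1)) hti)
          have hdecomp : pvRepl t n ht (c :: l')
              = (c :: l').take q.1.length ++ pvRepl t n ht ((c :: l').drop q.1.length) :=
            pvRepl_skip t n ht q.1.length (c :: l') (by simpa using hqlen) hnomatch
          have htk : ((c :: l').take q.1.length).length = q.1.length := by
            simp; omega
          -- RHS scan also picks q first
          cases hrepl : pvRepl t n ht (c :: l') with
          | nil => exact absurd (hstep.symm.trans hrepl) (by simp)
          | cons d m =>
            have hfR : ts.find? (fun p => p.1.isPrefixOf (d :: m)) = some q := by
              rw [← hrepl, ← hfind]; exact hf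
            rw [pvScan_cons_some ts hts _ _ _ hfR]
            have hdropeq : (d :: m).drop q.1.length = pvRepl t n ht ((c :: l').drop q.1.length) := by
              rw [← hrepl, hdecomp, List.drop_left' htk]
            rw [hdropeq]
            rw [ih ((c :: l').drop q.1.length) (by simp; omega)]

theorem pvScan_table_nil (h : ∀ p ∈ ([] : List (List Char × List Char)), 1 ≤ p.1.length) :
    ∀ l, pvScan [] h l = l := by
  intro l
  induction l with
  | nil => rw [pvScan_nil]
  | cons c l ih => rw [pvScan_cons_none _ _ _ _ rfl, ih]

theorem pvChain (l : List Char) :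
    pvScan pvTable pvTable_ne l = pvReplS "u64".toList "int".toList (pvReplS "usize".toList "int".toList (pvReplS "u8".toList "int".toList (pvReplS "u16".toList "int".toList (pvReplS "u32".toList "int".toList (pvReplS "i64".toList "int".toList (pvReplS "isize".toList "int".toList (pvReplS "i8".toList "int".toList (pvReplS "i16".toList "int".toList (pvReplS "i32".toList "int".toList (pvReplS "String".toList "str".toList (l))))))))))) := by
  calc pvScan pvTable pvTable_ne l
    _ = pvScan [("i32".toList, "int".toList), ("i16".toList, "int".toList), ("i8".toList, "int".toList), ("isize".toList, "int".toList), ("i64".toList, "int".toList), ("u32".toList, "int".toList), ("u16".toList, "int".toList), ("u8".toList, "int".toList), ("usize".toList, "int".toList), ("u64".toList, "int".toList)] (by decide) (pvReplS "String".toList "str".toList (l)) := by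
          rw [pvReplS_eq "String".toList "str".toList (by decide) (l)]
          exact pvPeel "String".toList "str".toList (by decide) [("i32".toList, "int".toList), ("i16".toList, "int".toList), ("i8".toList, "int".toList), ("isize".toList, "int".toList), ("i64".toList, "int".toList), ("u32".toList, "int".toList), ("u16".toList, "int".toList), ("u8".toList, "int".toList), ("usize".toList, "int".toList), ("u64".toList, "int".toList)]
            (by decide) (by decide) (by decide) (by decide) (by decide) (l)
    _ = pvScan [("i16".toList, "int".toList), ("i8".toList, "int".toList), ("isize".toList, "int".toList), ("i64".toList, "int".toList), ("u32".toList, "int".toList), ("u16".toList, "int".toList), ("u8".toList, "int".toList), ("usize".toList, "int".toList), ("u64".toList, "int".toList)] (by decide) (pvReplS "i32".toList "int".toList (pvReplS "String".toList "str".toList (l))) := by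
          rw [pvReplS_eq "i32".toList "int".toList (by decide) (pvReplS "String".toList "str".toList (l))]
          exact pvPeel "i32".toList "int".toList (by decide) [("i16".toList, "int".toList), ("i8".toList, "int".toList), ("isize".toList, "int".toList), ("i64".toList, "int".toList), ("u32".toList, "int".toList), ("u16".toList, "int".toList), ("u8".toList, "int".toList), ("usize".toList, "int".toList), ("u64".toList, "int".toList)]
            (by decide) (by decide) (by decide) (by decide) (by decide) (pvReplS "String".toList "str".toList (l))
    _ = pvScan [("i8".toList, "int".toList), ("isize".toList, "int".toList), ("i64".toList, "int".toList), ("u32".toList, "int".toList), ("u16".toList, "int".toList), ("u8".toList, "int".toList), ("usize".toList, "int".toList), ("u64".toList, "int".toList)] (by decide) (pvReplS "i16".toList "int".toList (pvReplS "i32".toList "int".toList (pvReplS "String".toList "str".toList (l)))) := by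
          rw [pvReplS_eq "i16".toList "int".toList (by decide) (pvReplS "i32".toList "int".toList (pvReplS "String".toList "str".toList (l)))]
          exact pvPeel "i16".toList "int".toList (by decide) [("i8".toList, "int".toList), ("isize".toList, "int".toList), ("i64".toList, "int".toList), ("u32".toList, "int".toList), ("u16".toList, "int".toList), ("u8".toList, "int".toList), ("usize".toList, "int".toList), ("u64".toList, "int".toList)]
            (by decide) (by decide) (by decide) (by decide) (by decide) (pvReplS "i32".toList "int".toList (pvReplS "String".toList "str".toList (l)))
    _ = pvScan [("isize".toList, "int".toList), ("i64".toList, "int".toList), ("u32".toList, "int".toList), ("u16".toList, "int".toList), ("u8".toList, "int".toList), ("usize".toList, "int".toList), ("u64".toList, "int".toList)] (by decide) (pvReplS "i8".toList "int".toList (pvReplS "i16".toList "int".toList (pvReplS "i32".toList "int".toList (pvReplS "String".toList "str".toList (l))))) := by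
          rw [pvReplS_eq "i8".toList "int".toList (by decide) (pvReplS "i16".toList "int".toList (pvReplS "i32".toList "int".toList (pvReplS "String".toList "str".toList (l))))]
          exact pvPeel "i8".toList "int".toList (by decide) [("isize".toList, "int".toList), ("i64".toList, "int".toList), ("u32".toList, "int".toList), ("u16".toList, "int".toList), ("u8".toList, "int".toList), ("usize".toList, "int".toList), ("u64".toList, "int".toList)]
            (by decide) (by decide) (by decide) (by decide) (by decide) (pvReplS "i16".toList "int".toList (pvReplS "i32".toList "int".toList (pvReplS "String".toList "str".toList (l))))
    _ = pvScan [("i64".toList, "int".toList), ("u32".toList, "int".toList), ("u16".toList, "int".toList), ("u8".toList, "int".toList), ("usize".toList, "int".toList), ("u64".toList, "int".toList)] (by decide) (pvReplS "isize".toList "int".toList (pvReplS "i8".toList "int".toList (pvReplS "i16".toList "int".toList (pvReplS "i32".toList "int".toList (pvReplS "String".toList "str".toList (l)))))) := by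
          rw [pvReplS_eq "isize".toList "int".toList (by decide) (pvReplS "i8".toList "int".toList (pvReplS "i16".toList "int".toList (pvReplS "i32".toList "int".toList (pvReplS "String".toList "str".toList (l)))))]
          exact pvPeel "isize".toList "int".toList (by decide) [("i64".toList, "int".toList), ("u32".toList, "int".toList), ("u16".toList, "int".toList), ("u8".toList, "int".toList), ("usize".toList, "int".toList), ("u64".toList, "int".toList)]
            (by decide) (by decide) (by decide) (by decide) (by decide) (pvReplS "i8".toList "int".toList (pvReplS "i16".toList "int".toList (pvReplS "i32".toList "int".toList (pvReplS "String".toList "str".toList (l)))))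
    _ = pvScan [("u32".toList, "int".toList), ("u16".toList, "int".toList), ("u8".toList, "int".toList), ("usize".toList, "int".toList), ("u64".toList, "int".toList)] (by decide) (pvReplS "i64".toList "int".toList (pvReplS "isize".toList "int".toList (pvReplS "i8".toList "int".toList (pvReplS "i16".toList "int".toList (pvReplS "i32".toList "int".toList (pvReplS "String".toList "str".toList (l))))))) := by
          rw [pvReplS_eq "i64".toList "int".toList (by decide) (pvReplS "isize".toList "int".toList (pvReplS "i8".toList "int".toList (pvReplS "i16".toList "int".toList (pvReplS "i32".toList "int".toList (pvReplS "String".toList "str".toList (l))))))]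
          exact pvPeel "i64".toList "int".toList (by decide) [("u32".toList, "int".toList), ("u16".toList, "int".toList), ("u8".toList, "int".toList), ("usize".toList, "int".toList), ("u64".toList, "int".toList)]
            (by decide) (by decide) (by decide) (by decide) (by decide) (pvReplS "isize".toList "int".toList (pvReplS "i8".toList "int".toList (pvReplS "i16".toList "int".toList (pvReplS "i32".toList "int".toList (pvReplS "String".toList "str".toList (l))))))
    _ = pvScan [("u16".toList, "int".toList), ("u8".toList, "int".toList), ("usize".toList, "int".toList), ("u64".toList, "int".toList)] (by decide) (pvReplS "u32".toList "int".toList (pvReplS "i64".toList "int".toList (pvReplS "isize".toList "int".toList (pvReplS "i8".toList "int".toList (pvReplS "i16".toList "int".toList (pvReplS "i32".toList "int".toList (pvReplS "String".toList "str".toList (l)))))))) := by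
          rw [pvReplS_eq "u32".toList "int".toList (by decide) (pvReplS "i64".toList "int".toList (pvReplS "isize".toList "int".toList (pvReplS "i8".toList "int".toList (pvReplS "i16".toList "int".toList (pvReplS "i32".toList "int".toList (pvReplS "String".toList "str".toList (l)))))))]
          exact pvPeel "u32".toList "int".toList (by decide) [("u16".toList, "int".toList), ("u8".toList, "int".toList), ("usize".toList, "int".toList), ("u64".toList, "int".toList)]
            (by decide) (by decide) (by decide) (by decide) (by decide) (pvReplS "i64".toList "int".toList (pvReplS "isize".toList "int".toList (pvReplS "i8".toList "int".toList (pvReplS "i16".toList "int".toList (pvReplS "i32".toList "int".toList (pvReplS "String".toList "str".toList (l)))))))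
    _ = pvScan [("u8".toList, "int".toList), ("usize".toList, "int".toList), ("u64".toList, "int".toList)] (by decide) (pvReplS "u16".toList "int".toList (pvReplS "u32".toList "int".toList (pvReplS "i64".toList "int".toList (pvReplS "isize".toList "int".toList (pvReplS "i8".toList "int".toList (pvReplS "i16".toList "int".toList (pvReplS "i32".toList "int".toList (pvReplS "String".toList "str".toList (l))))))))) := by
          rw [pvReplS_eq "u16".toList "int".toList (by decide) (pvReplS "u32".toList "int".toList (pvReplS "i64".toList "int".toList (pvReplS "isize".toList "int".toList (pvReplS "i8".toList "int".toList (pvReplS "i16".toList "int".toList (pvReplS "i32".toList "int".toList (pvReplS "String".toList "str".toList (l))))))))]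
          exact pvPeel "u16".toList "int".toList (by decide) [("u8".toList, "int".toList), ("usize".toList, "int".toList), ("u64".toList, "int".toList)]
            (by decide) (by decide) (by decide) (by decide) (by decide) (pvReplS "u32".toList "int".toList (pvReplS "i64".toList "int".toList (pvReplS "isize".toList "int".toList (pvReplS "i8".toList "int".toList (pvReplS "i16".toList "int".toList (pvReplS "i32".toList "int".toList (pvReplS "String".toList "str".toList (l))))))))
    _ = pvScan [("usize".toList, "int".toList), ("u64".toList, "int".toList)] (by decide) (pvReplS "u8".toList "int".toList (pvReplS "u16".toList "int".toList (pvReplS "u32".toList "int".toList (pvReplS "i64".toList "int".toList (pvReplS "isize".toList "int".toList (pvReplS "i8".toList "int".toList (pvReplS "i16".toList "int".toList (pvReplS "i32".toList "int".toList (pvReplS "String".toList "str".toList (l)))))))))) := by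
          rw [pvReplS_eq "u8".toList "int".toList (by decide) (pvReplS "u16".toList "int".toList (pvReplS "u32".toList "int".toList (pvReplS "i64".toList "int".toList (pvReplS "isize".toList "int".toList (pvReplS "i8".toList "int".toList (pvReplS "i16".toList "int".toList (pvReplS "i32".toList "int".toList (pvReplS "String".toList "str".toList (l)))))))))]
          exact pvPeel "u8".toList "int".toList (by decide) [("usize".toList, "int".toList), ("u64".toList, "int".toList)]
            (by decide) (by decide) (by decide) (by decide) (by decide) (pvReplS "u16".toList "int".toList (pvReplS "u32".toList "int".toList (pvReplS "i64".toList "int".toList (pvReplS "isize".toList "int".toList (pvReplS "i8".toList "int".toList (pvReplS "i16".toList "int".toList (pvReplS "i32".toList "int".toList (pvReplS "String".toList "str".toList (l)))))))))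
    _ = pvScan [("u64".toList, "int".toList)] (by decide) (pvReplS "usize".toList "int".toList (pvReplS "u8".toList "int".toList (pvReplS "u16".toList "int".toList (pvReplS "u32".toList "int".toList (pvReplS "i64".toList "int".toList (pvReplS "isize".toList "int".toList (pvReplS "i8".toList "int".toList (pvReplS "i16".toList "int".toList (pvReplS "i32".toList "int".toList (pvReplS "String".toList "str".toList (l))))))))))) := by
          rw [pvReplS_eq "usize".toList "int".toList (by decide) (pvReplS "u8".toList "int".toList (pvReplS "u16".toList "int".toList (pvReplS "u32".toList "int".toList (pvReplS "i64".toList "int".toList (pvReplS "isize".toList "int".toList (pvReplS "i8".toList "int".toList (pvReplS "i16".toList "int".toList (pvReplS "i32".toList "int".toList (pvReplS "String".toList "str".toList (l))))))))))]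
          exact pvPeel "usize".toList "int".toList (by decide) [("u64".toList, "int".toList)]
            (by decide) (by decide) (by decide) (by decide) (by decide) (pvReplS "u8".toList "int".toList (pvReplS "u16".toList "int".toList (pvReplS "u32".toList "int".toList (pvReplS "i64".toList "int".toList (pvReplS "isize".toList "int".toList (pvReplS "i8".toList "int".toList (pvReplS "i16".toList "int".toList (pvReplS "i32".toList "int".toList (pvReplS "String".toList "str".toList (l))))))))))
    _ = pvScan [] (by decide) (pvReplS "u64".toList "int".toList (pvReplS "usize".toList "int".toList (pvReplS "u8".toList "int".toList (pvReplS "u16".toList "int".toList (pvReplS "u32".toList "int".toList (pvReplS "i64".toList "int".toList (pvReplS "isize".toList "int".toList (pvReplS "i8".toList "int".toList (pvReplS "i16".toList "int".toList (pvReplS "i32".toList "int".toList (pvReplS "String".toList "str".toList (l)))))))))))) := by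
          rw [pvReplS_eq "u64".toList "int".toList (by decide) (pvReplS "usize".toList "int".toList (pvReplS "u8".toList "int".toList (pvReplS "u16".toList "int".toList (pvReplS "u32".toList "int".toList (pvReplS "i64".toList "int".toList (pvReplS "isize".toList "int".toList (pvReplS "i8".toList "int".toList (pvReplS "i16".toList "int".toList (pvReplS "i32".toList "int".toList (pvReplS "String".toList "str".toList (l)))))))))))]
          exact pvPeel "u64".toList "int".toList (by decide) []
            (by decide) (by decide) (by decide) (by decide) (by decide) (pvReplS "usize".toList "int".toList (pvReplS "u8".toList "int".toList (pvReplS "u16".toList "int".toList (pvReplS "u32".toList "int".toList (pvReplS "i64".toList "int".toList (pvReplS "isize".toList "int".toList (pvReplS "i8".toList "int".toList (pvReplS "i16".toList "int".toList (pvReplS "i32".toList "int".toList (pvReplS "String".toList "str".toList (l)))))))))))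
    _ = pvReplS "u64".toList "int".toList (pvReplS "usize".toList "int".toList (pvReplS "u8".toList "int".toList (pvReplS "u16".toList "int".toList (pvReplS "u32".toList "int".toList (pvReplS "i64".toList "int".toList (pvReplS "isize".toList "int".toList (pvReplS "i8".toList "int".toList (pvReplS "i16".toList "int".toList (pvReplS "i32".toList "int".toList (pvReplS "String".toList "str".toList (l))))))))))) := pvScan_table_nil (by decide) _

theorem aChain (word : String) :
    replace_to_pytypes word = String.ofList (pvReplS "u64".toList "int".toList (pvReplS "usize".toList "int".toList (pvReplS "u8".toList "int".toList (pvReplS "u16".toList "int".toList (pvReplS "u32".toList "int".toList (pvReplS "i64".toList "int".toList (pvReplS "isize".toList "int".toList (pvReplS "i8".toList "int".toList (pvReplS "i16".toList "int".toList (pvReplS "i32".toList "int".toList (pvReplS "String".toList "str".toList (word.toList)))))))))))) := by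
  unfold replace_to_pytypes
  simp only [List.foldl_cons, List.foldl_nil]
  simp only [PySem.Str.replace, String.toList_ofList]
  rw [chars_eq _ "String".toList "str".toList (by decide)]
  rw [chars_eq _ "i32".toList "int".toList (by decide)]
  rw [chars_eq _ "i16".toList "int".toList (by decide)]
  rw [chars_eq _ "i8".toList "int".toList (by decide)]
  rw [chars_eq _ "isize".toList "int".toList (by decide)]
  rw [chars_eq _ "i64".toList "int".toList (by decide)]
  rw [chars_eq _ "u32".toList "int".toList (by decide)]
  rw [chars_eq _ "u16".toList "int".toList (by decide)]
  rw [chars_eq _ "u8".toList "int".toList (by decide)]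
  rw [chars_eq _ "usize".toList "int".toList (by decide)]
  rw [chars_eq _ "u64".toList "int".toList (by decide)]

theorem pvFinal (word : String) :
    replace_to_pytypes word = String.ofList (pvScan pvTable pvTable_ne word.toList) := by
  rw [aChain, pvChain]

-- ===== VERDICT (by name: the statement is the Claim_ definition above) =====
theorem replace_to_pytypes_spec : Claim_equal_replace_to_pytypes := by
  intro word _
  unfold Spec_replace_to_pytypes replace_to_pytypes_alt
  exact pvFinal word
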